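-- pv_equiv track=rewrite | github.com/Eve0028/theft-detector | session/scripts/eeg_analyzer_app.py | _grid_space_size
-- ===== SOURCE A (Python) =====
-- from itertools import product as _iter_product
--
-- def _grid_space_size(ranges):
--     """Return the number of combinations without materializing the grid."""
--     if not ranges:
--         return 0
--     # Adaptive k applies only to IQR / Z-score rejection; count accordingly.
--     if 's1_adaptive_k' in ranges and 's1_rejection' in ranges:
--         return len(_build_grid_space(ranges))
--     n = 1
--     for vals in ranges.values():
--         n *= len(vals)
--     return n
--
-- def _build_grid_space(ranges):
--     """Cartesian product of *ranges* → ``list[dict]``.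
--
--     When both ``s1_rejection`` and ``s1_adaptive_k`` are present, values of
--     *s1_adaptive_k* are crossed in only for ``iqr`` / ``zscore``. For
--     ``autoreject`` (or other methods), *k* is omitted so ``base_cfg`` applies.
--     """
--     if not ranges:
--         return []
--     k_key = 's1_adaptive_k'
--     rej_key = 's1_rejection'
--     if k_key in ranges and rej_key in ranges:
--         k_vals = ranges[k_key]
--         sub_ranges = {k: v for k, v in ranges.items() if k != k_key}
--         keys = list(sub_ranges.keys())
--         values = [sub_ranges[k] for k in keys]
--         out = []
--         for combo in _iter_product(*values):
--             row = dict(zip(keys, combo))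
--             rej = row.get(rej_key)
--             if rej in ('iqr', 'zscore'):
--                 for kv in k_vals:
--                     out.append({**row, k_key: kv})
--             else:
--                 out.append(dict(row))
--         return out
--     keys = list(ranges.keys())
--     values = [ranges[k] for k in keys]
--     return [dict(zip(keys, combo)) for combo in _iter_product(*values)]
-- ===== SOURCE B (Python) =====
-- def _grid_space_size(ranges):
--     """Count combinations in closed form; no grid is materialized."""
--     if not ranges:
--         return 0
--     if 's1_adaptive_k' in ranges and 's1_rejection' in ranges:
--         k = len(ranges['s1_adaptive_k'])
--         base = 1
--         for key, vals in ranges.items():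
--             if key != 's1_adaptive_k' and key != 's1_rejection':
--                 base *= len(vals)
--         return base * sum(k if v in ('iqr', 'zscore') else 1
--                           for v in ranges['s1_rejection'])
--     n = 1
--     for vals in ranges.values():
--         n *= len(vals)
--     return n
-- ===== Notes on version B (the rewrite author's own statement) =====
-- stated objective: alternative
-- what changed: Instead of materializing the full cartesian grid of dicts and taking its length in the adaptive-k case, B computes the count in closed form: the product of the other ranges' sizes times the sum over s1_rejection values of (len(k-values) for iqr/zscore, else 1).
import Mathlib
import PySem

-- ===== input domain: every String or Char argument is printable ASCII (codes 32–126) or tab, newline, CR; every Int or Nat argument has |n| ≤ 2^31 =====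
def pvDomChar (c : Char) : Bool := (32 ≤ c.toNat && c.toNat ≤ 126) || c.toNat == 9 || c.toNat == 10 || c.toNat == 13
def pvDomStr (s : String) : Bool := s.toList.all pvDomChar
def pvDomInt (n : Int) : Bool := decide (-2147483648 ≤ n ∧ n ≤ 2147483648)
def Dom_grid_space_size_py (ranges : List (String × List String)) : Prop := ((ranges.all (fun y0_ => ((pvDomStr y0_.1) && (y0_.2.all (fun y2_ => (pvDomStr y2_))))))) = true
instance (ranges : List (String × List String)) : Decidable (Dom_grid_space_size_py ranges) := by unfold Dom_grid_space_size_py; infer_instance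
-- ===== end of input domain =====

-- B replaces A's materialized cartesian grid (in the adaptive-k case) by a closed-form count:
-- product of the other range sizes times a weighted sum over the s1_rejection values (objective: alternative).
-- The dict argument is decoded by PySem.Dict.ofList in both ports (identity on genuine dict encodings).

-- ===== PORT A =====
-- itertools.product(*values): all combinations, leftmost iterable varying slowest
def pvProd (vss : List (List String)) : List (List String) :=
  match vss with
  | [] => [[]]
  | vs :: rest => vs.flatMap (fun v => (pvProd rest).map (fun c => v :: c))

-- port of the helper _build_grid_space
def pvBuildGrid (ranges : List (String × List String)) : List (PySem.Dict String String) :=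
  let d := PySem.Dict.ofList ranges
  if d.items.isEmpty then []
  else if d.contains "s1_adaptive_k" && d.contains "s1_rejection" then
    let k_vals := d.getD "s1_adaptive_k" []
    let sub := PySem.Dict.mk (d.items.filter (fun kv => kv.1 != "s1_adaptive_k"))
    let keys := sub.keys
    let values := keys.map (fun k => sub.getD k [])
    (pvProd values).foldl (fun out combo =>
      let row := PySem.Dict.ofList (keys.zip combo)
      let rej := row.get? "s1_rejection"
      out ++ (if rej = some "iqr" ∨ rej = some "zscore"
              then k_vals.map (fun kv => row.insert "s1_adaptive_k" kv)
              else [row])) []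
  else
    let keys := d.keys
    let values := keys.map (fun k => d.getD k [])
    (pvProd values).map (fun combo => PySem.Dict.ofList (keys.zip combo))

def grid_space_size_py (ranges : List (String × List String)) : Int :=
  let d := PySem.Dict.ofList ranges
  if d.items.isEmpty then 0
  else if d.contains "s1_adaptive_k" && d.contains "s1_rejection" then
    ((pvBuildGrid ranges).length : Int)
  else
    d.values.foldl (fun n vs => n * (vs.length : Int)) 1

-- ===== PORT B =====
def grid_space_size_py_alt (ranges : List (String × List String)) : Int :=
  let d := PySem.Dict.ofList ranges
  if d.items.isEmpty then 0
  else if d.contains "s1_adaptive_k" && d.contains "s1_rejection" then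
    let k : Int := ((d.getD "s1_adaptive_k" []).length : Int)
    let base : Int := d.items.foldl (fun b kv =>
      if kv.1 ≠ "s1_adaptive_k" ∧ kv.1 ≠ "s1_rejection" then b * (kv.2.length : Int) else b) 1
    base * ((d.getD "s1_rejection" []).map
      (fun v => if v = "iqr" ∨ v = "zscore" then k else 1)).sum
  else
    d.values.foldl (fun n vs => n * (vs.length : Int)) 1

-- ===== PRECONDITION & SPEC =====
def Spec_grid_space_size_py (ranges : List (String × List String)) (out : Int) : Prop := out = grid_space_size_py_alt ranges
instance (ranges : List (String × List String)) (out : Int) : Decidable (Spec_grid_space_size_py ranges out) := by unfold Spec_grid_space_size_py; infer_instance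

-- ===== CLAIM (what is proved, stated in full; the proofs are below) =====
def Claim_equal_grid_space_size_py : Prop := ∀ (ranges : List (String × List String)), Dom_grid_space_size_py ranges → Spec_grid_space_size_py ranges (grid_space_size_py ranges)

-- ===== LEMMAS AND PROOFS =====

-- weight of one combo row: len(k_vals) when its rejection value is iqr/zscore, else 1
def pvW (kc : Int) (o : Option String) : Int :=
  if o = some "iqr" ∨ o = some "zscore" then kc else 1

-- the Int sum of row weights over the combo grid of N
def pvSumW (kc : Int) (N : List (String × List String)) : Int :=
  ((pvProd (N.map (fun p => p.2))).map
    (fun c => pvW kc ((PySem.Dict.mk ((N.map (fun p => p.1)).zip c)).get? "s1_rejection"))).sum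

theorem pv_sum_flatMap {α β : Type} (l : List α) (f : α → List β) (g : β → Int) :
    ((l.flatMap f).map g).sum = (l.map (fun v => ((f v).map g).sum)).sum := by
  induction l with
  | nil => rfl
  | cons a l ih => simp [List.flatMap_cons, List.sum_append, ih]

theorem pv_map_fst_zip_take {α β : Type} (ks : List α) (c : List β) :
    (ks.zip c).map Prod.fst = ks.take c.length := by
  induction ks generalizing c with
  | nil => simp
  | cons k ks ih => cases c <;> simp [ih]

theorem pv_length_pvProd (vss : List (List String)) :
    (pvProd vss).length = (vss.map List.length).prod := by
  induction vss with
  | nil => rfl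
  | cons vs rest ih =>
      simp [pvProd, List.length_flatMap, ih, List.map_const', List.sum_replicate,
        smul_eq_mul]

theorem pv_ofList_eq_mk (ps : List (String × String)) (h : (ps.map Prod.fst).Nodup) :
    PySem.Dict.ofList ps = PySem.Dict.mk ps := by
  apply PySem.Dict.ext
  have := PySem.Dict.items_foldl_insert_fresh (l := ps) (k := Prod.fst) (v := Prod.snd)
      (d := PySem.Dict.empty) (by intro a _; rfl) h
  simpa using this

theorem pv_foldl_mul_if (p : (String × List String) → Prop) [DecidablePred p]
    (f : (String × List String) → Int) (l : List (String × List String)) (i : Int) :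
    l.foldl (fun b kv => if p kv then b * f kv else b) i
      = i * ((l.filter (fun kv => decide (p kv))).map f).prod := by
  induction l generalizing i with
  | nil => simp
  | cons kv l ih =>
      by_cases h : p kv <;> simp [h, ih, mul_assoc]

theorem pv_sumW_decomp (kc : Int) (rvals : List String)
    (Q : List (String × List String)) :
    ∀ (P : List (String × List String)), "s1_rejection" ∉ P.map Prod.fst →
    pvSumW kc (P ++ ("s1_rejection", rvals) :: Q) =
      (P.map (fun p => (p.2.length : Int))).prod *
        ((rvals.map (fun v => pvW kc (some v))).sum *
          (Q.map (fun p => (p.2.length : Int))).prod) := by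
  intro P
  induction P with
  | nil =>
      intro _
      unfold pvSumW
      simp only [List.nil_append, List.map_cons, pvProd]
      rw [pv_sum_flatMap]
      have hconst : ∀ v : String,
          (((pvProd (Q.map (fun p => p.2))).map (fun c => v :: c)).map
            (fun c => pvW kc ((PySem.Dict.mk
              (("s1_rejection" :: Q.map (fun p => p.1)).zip c)).get? "s1_rejection"))).sum
          = ((pvProd (Q.map (fun p => p.2))).length : Int) * pvW kc (some v) := by
        intro v
        rw [List.map_map]
        have : ((pvProd (Q.map (fun p => p.2))).map
            ((fun c => pvW kc ((PySem.Dict.mk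
              (("s1_rejection" :: Q.map (fun p => p.1)).zip c)).get? "s1_rejection")) ∘
              (fun c => v :: c)))
            = (pvProd (Q.map (fun p => p.2))).map (fun _ => pvW kc (some v)) := by
          apply List.map_congr_left
          intro c _
          simp [PySem.Dict.get?_mk_cons]
        rw [this]
        simp [pysem]
      calc ((rvals.map (fun v =>
              (((pvProd (Q.map (fun p => p.2))).map (fun c => v :: c)).map
                (fun c => pvW kc ((PySem.Dict.mk
                  (("s1_rejection" :: Q.map (fun p => p.1)).zip c)).get? "s1_rejection"))).sum)).sum)
          = (rvals.map (fun v =>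
              ((pvProd (Q.map (fun p => p.2))).length : Int) * pvW kc (some v))).sum := by
            exact congrArg List.sum (List.map_congr_left (fun v _ => hconst v))
        _ = ((pvProd (Q.map (fun p => p.2))).length : Int) *
              (rvals.map (fun v => pvW kc (some v))).sum := by
            rw [← List.sum_map_mul_left]
        _ = 1 * ((rvals.map (fun v => pvW kc (some v))).sum *
              (Q.map (fun p => (p.2.length : Int))).prod) := by
            rw [pv_length_pvProd]
            push_cast
            simp only [List.map_map, Function.comp_def]
            ring
  | cons kv P ih =>
      intro hmem
      have hk : kv.1 ≠ "s1_rejection" := by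
        intro h; exact hmem (by simp [h])
      have hmem' : "s1_rejection" ∉ P.map Prod.fst := by
        intro h; exact hmem (by simp [h])
      unfold pvSumW
      simp only [List.cons_append, List.map_cons, pvProd]
      rw [pv_sum_flatMap]
      have hconst : ∀ v : String,
          (((pvProd ((P ++ ("s1_rejection", rvals) :: Q).map (fun p => p.2))).map
              (fun c => v :: c)).map
            (fun c => pvW kc ((PySem.Dict.mk
              ((kv.1 :: (P ++ ("s1_rejection", rvals) :: Q).map (fun p => p.1)).zip c)).get?
                "s1_rejection"))).sum
          = pvSumW kc (P ++ ("s1_rejection", rvals) :: Q) := by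
        intro v
        rw [List.map_map]
        unfold pvSumW
        apply congrArg List.sum
        apply List.map_congr_left
        intro c _
        have hb : (kv.1 == "s1_rejection") = false := by
          simpa using hk
        simp [PySem.Dict.get?_mk_cons, hb]
      calc (kv.2.map (fun v =>
              (((pvProd ((P ++ ("s1_rejection", rvals) :: Q).map (fun p => p.2))).map
                  (fun c => v :: c)).map
                (fun c => pvW kc ((PySem.Dict.mk
                  ((kv.1 :: (P ++ ("s1_rejection", rvals) :: Q).map (fun p => p.1)).zip c)).get?
                    "s1_rejection"))).sum)).sum
          = (kv.2.map (fun _ => pvSumW kc (P ++ ("s1_rejection", rvals) :: Q))).sum := by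
            exact congrArg List.sum (List.map_congr_left (fun v _ => hconst v))
        _ = (kv.2.length : Int) * pvSumW kc (P ++ ("s1_rejection", rvals) :: Q) := by
            simp [pysem]
        _ = _ := by rw [ih hmem', List.prod_cons]; ring

theorem pv_len_branch (kvals : List String) (N : List (String × List String))
    (hnd : (N.map (fun p => p.1)).Nodup) :
    (((pvProd (N.map (fun p => p.2))).foldl (fun out combo =>
        out ++ (if (PySem.Dict.ofList ((N.map (fun p => p.1)).zip combo)).get? "s1_rejection" = some "iqr" ∨
                   (PySem.Dict.ofList ((N.map (fun p => p.1)).zip combo)).get? "s1_rejection" = some "zscore"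
                then kvals.map (fun kv =>
                  (PySem.Dict.ofList ((N.map (fun p => p.1)).zip combo)).insert "s1_adaptive_k" kv)
                else [PySem.Dict.ofList ((N.map (fun p => p.1)).zip combo)])) []).length : Int)
    = pvSumW (kvals.length : Int) N := by
  rw [PySem.List.foldl_append_eq_flatMap, List.nil_append]
  unfold pvSumW
  rw [List.length_flatMap, Nat.cast_list_sum, List.map_map]
  apply congrArg List.sum
  apply List.map_congr_left
  intro c _
  have hmk : PySem.Dict.ofList ((N.map (fun p => p.1)).zip c)
      = PySem.Dict.mk ((N.map (fun p => p.1)).zip c) := by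
    apply pv_ofList_eq_mk
    rw [pv_map_fst_zip_take]
    exact (List.take_sublist _ _).nodup hnd
  simp only [Function.comp_def, hmk]
  unfold pvW
  split_ifs with h
  · simp
  · simp

-- ===== VERDICT (by name: the statement is the Claim_ definition above) =====
theorem grid_space_size_py_spec : Claim_equal_grid_space_size_py := by
  intro ranges _
  unfold Spec_grid_space_size_py grid_space_size_py grid_space_size_py_alt
  by_cases hemp : (PySem.Dict.ofList ranges).items.isEmpty = true
  · simp [hemp]
  · by_cases hcon : ((PySem.Dict.ofList ranges).contains "s1_adaptive_k" &&
        (PySem.Dict.ofList ranges).contains "s1_rejection") = true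
    · simp only [hemp, hcon, Bool.false_eq_true, if_false, if_true]
      have hrk : (PySem.Dict.ofList ranges).contains "s1_rejection" = true :=
        (Bool.and_eq_true _ _ ▸ hcon).2
      have hndk : (PySem.Dict.ofList ranges).keys.Nodup := PySem.Dict.nodup_keys_ofList ranges
      have hmemk : "s1_rejection" ∈ (PySem.Dict.ofList ranges).keys :=
        (PySem.Dict.contains_iff_mem_keys _ _).mp hrk
      obtain ⟨rv, hpL⟩ : ∃ x, ("s1_rejection", x) ∈ (PySem.Dict.ofList ranges).items := by
        simpa [PySem.Dict.keys] using hmemk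
      obtain ⟨P, Q, hLPQ⟩ := List.append_of_mem hpL
      have hnd : (((P ++ ("s1_rejection", rv) :: Q).map (fun x => x.1))).Nodup := by
        rw [← hLPQ]
        simpa [PySem.Dict.keys] using hndk
      have hPn : "s1_rejection" ∉ P.map (fun x : String × List String => x.1) := by
        simp [List.nodup_append] at hnd
        intro hmemP
        obtain ⟨x, hx, hx1⟩ := List.mem_map.mp hmemP
        exact (hnd.2.2 x.1 x.2 (by simpa using hx)).1 hx1
      have hrveq : (PySem.Dict.ofList ranges).getD "s1_rejection" [] = rv :=
        PySem.Dict.getD_of_mem_items _ hpL hndk []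
      unfold pvBuildGrid
      simp only [hemp, hcon, Bool.false_eq_true, if_false, if_true]
      set N := (PySem.Dict.ofList ranges).items.filter (fun kv => kv.1 != "s1_adaptive_k") with hN
      have hndN : (N.map (fun p => p.1)).Nodup := by
        have hsub0 : List.Sublist N (PySem.Dict.ofList ranges).items := List.filter_sublist
        exact (hsub0.map (fun p : String × List String => p.1)).nodup
          (by simpa [PySem.Dict.keys] using hndk)
      have hkeys : (PySem.Dict.mk N).keys = N.map (fun p => p.1) := rfl
      have hvalseq : (PySem.Dict.mk N).keys.map (fun k => (PySem.Dict.mk N).getD k []) =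
          N.map (fun p => p.2) := by
        have h := (PySem.Dict.values_eq_map_keys (PySem.Dict.mk N)
          (by simpa [PySem.Dict.keys] using hndN) ([] : List String)).symm
        simpa [PySem.Dict.values] using h
      rw [hvalseq, hkeys, pv_len_branch _ _ hndN]
      have hNsplit : N = P.filter (fun kv => kv.1 != "s1_adaptive_k") ++
          ("s1_rejection", rv) :: Q.filter (fun kv => kv.1 != "s1_adaptive_k") := by
        rw [hN, hLPQ]
        simp
      have hPfn : "s1_rejection" ∉
          (P.filter (fun kv => kv.1 != "s1_adaptive_k")).map Prod.fst := by
        intro h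
        obtain ⟨x, hx, hx1⟩ := List.mem_map.mp h
        exact hPn (List.mem_map.mpr ⟨x, (List.mem_filter.mp hx).1, hx1⟩)
      rw [hNsplit, pv_sumW_decomp _ _ _ _ hPfn]
      rw [pv_foldl_mul_if (fun kv => kv.1 ≠ "s1_adaptive_k" ∧ kv.1 ≠ "s1_rejection")
        (fun kv => (kv.2.length : Int)) ((PySem.Dict.ofList ranges).items) 1]
      rw [hLPQ, hrveq]
      have hmid : (decide (("s1_rejection" : String) ≠ "s1_adaptive_k" ∧
          ("s1_rejection" : String) ≠ "s1_rejection")) = false := by decide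
      rw [List.filter_append, List.filter_cons]
      simp only [hmid, Bool.false_eq_true, if_false]
      have hfc : ∀ (R : List (String × List String)),
          "s1_rejection" ∉ R.map (fun x : String × List String => x.1) →
          R.filter (fun kv => decide (kv.1 ≠ "s1_adaptive_k" ∧ kv.1 ≠ "s1_rejection")) =
            R.filter (fun kv => kv.1 != "s1_adaptive_k") := by
        intro R hR
        apply List.filter_congr
        intro x hx
        have hxr : x.1 ≠ "s1_rejection" := fun h => hR (List.mem_map.mpr ⟨x, hx, h⟩)
        by_cases hc : x.1 = "s1_adaptive_k" <;> simp [hc, hxr, bne]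
      have hQn : "s1_rejection" ∉ Q.map (fun x : String × List String => x.1) := by
        simp [List.nodup_append] at hnd
        intro hmemQ
        obtain ⟨⟨a, b⟩, hx, hx1⟩ := List.mem_map.mp hmemQ
        simp only at hx1
        exact hnd.2.1.1 b (hx1 ▸ hx)
      rw [hfc P hPn, hfc Q hQn]
      simp only [pvW, Option.some.injEq, List.map_append, List.prod_append]
      ring
    · simp [hemp, hcon]
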